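-- pv_equiv track=rewrite | github.com/JavierKuri/compressor | compressor.py | get_code_and_closing_brace_index
-- ===== SOURCE A (Python) =====
-- def get_code_and_closing_brace_index(compressed_text):
--     code = ""
--     closing_brace_index = -1
--     for i in range(len(compressed_text)):
--         code += compressed_text[i]
--         if compressed_text[i] == "}":
--             closing_brace_index = i
--             break
--     return code, closing_brace_index
-- ===== SOURCE B (Python) =====
-- def get_code_and_closing_brace_index(compressed_text):
--     idx = compressed_text.find('}')
--     if idx == -1:
--         return compressed_text, -1
--     return compressed_text[:idx + 1], idx
-- ===== Notes on version B (the rewrite author's own statement) =====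
-- stated objective: idiomatic
-- what changed: Replaces the index loop with per-character string concatenation by a single str.find lookup and one slice.
import Mathlib
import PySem

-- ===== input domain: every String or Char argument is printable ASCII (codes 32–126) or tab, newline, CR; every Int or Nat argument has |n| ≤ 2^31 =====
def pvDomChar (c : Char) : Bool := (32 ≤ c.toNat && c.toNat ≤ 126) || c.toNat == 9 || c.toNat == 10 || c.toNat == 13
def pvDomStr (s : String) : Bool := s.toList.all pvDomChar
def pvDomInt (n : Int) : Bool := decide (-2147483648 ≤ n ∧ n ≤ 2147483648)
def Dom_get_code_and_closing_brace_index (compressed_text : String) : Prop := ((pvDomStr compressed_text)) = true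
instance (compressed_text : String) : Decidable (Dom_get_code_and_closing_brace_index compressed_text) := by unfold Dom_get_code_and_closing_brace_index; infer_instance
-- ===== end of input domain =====

-- B replaces A's index loop with char-by-char concatenation by one str.find lookup and one slice (idiomatic).

-- ===== PORT A =====
-- A's for-loop with early break: append each character to code, stop at the first '}'
def pvGoA : List Char → Int → List Char → List Char × Int
  | [], _, acc => (acc, -1)
  | c :: rest, i, acc =>
    let acc' := acc ++ [c]
    if c = '}' then (acc', i) else pvGoA rest (i + 1) acc'

def get_code_and_closing_brace_index (compressed_text : String) : String × Int :=
  let r := pvGoA compressed_text.toList 0 []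
  (String.ofList r.1, r.2)

-- ===== PORT B =====
def get_code_and_closing_brace_index_alt (compressed_text : String) : String × Int :=
  let idx := PySem.Str.find compressed_text "}"
  if idx = -1 then (compressed_text, -1)
  else (PySem.Str.slice compressed_text none (some (idx + 1)), idx)

-- ===== PRECONDITION & SPEC =====
def Spec_get_code_and_closing_brace_index (compressed_text : String) (out : String × Int) : Prop := out = get_code_and_closing_brace_index_alt compressed_text
instance (compressed_text : String) (out : String × Int) : Decidable (Spec_get_code_and_closing_brace_index compressed_text out) := by unfold Spec_get_code_and_closing_brace_index; infer_instance

-- ===== CLAIM (what is proved, stated in full; the proofs are below) =====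
def Claim_equal_get_code_and_closing_brace_index : Prop := ∀ (compressed_text : String), Dom_get_code_and_closing_brace_index compressed_text → Spec_get_code_and_closing_brace_index compressed_text (get_code_and_closing_brace_index compressed_text)

-- ===== LEMMAS AND PROOFS =====

-- A's loop, characterised by the first index of '}' (if any)
theorem pvGoA_eq (cs : List Char) (i : Int) (acc : List Char) :
    pvGoA cs i acc =
      match cs.findIdx? (· = '}') with
      | none => (acc ++ cs, -1)
      | some n => (acc ++ cs.take (n + 1), i + n) := by
  induction cs generalizing i acc with
  | nil => simp [pvGoA]
  | cons c rest ih =>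
    by_cases hc : c = '}'
    · simp [pvGoA, hc, List.findIdx?_cons]
    · simp only [pvGoA, hc, if_false, ih, List.findIdx?_cons, decide_eq_true_eq]
      cases h : rest.findIdx? (· = '}') with
      | none => simp
      | some n =>
        simp [List.take_succ_cons]
        omega

-- a singleton list is a prefix exactly when the head is that element
theorem singleton_prefix_iff (a : Char) (l : List Char) : [a] <+: l ↔ l.head? = some a := by
  cases l with
  | nil => simp
  | cons x xs =>
    constructor
    · rintro ⟨t, ht⟩; simp at ht; simp [ht.1]
    · intro h; simp at h; exact ⟨xs, by simp [h]⟩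

-- Python's s.find('}') is the first index of '}' (or -1 if absent)
theorem find_brace_eq (cs : List Char) :
    PySem.Chars.find cs ['}'] =
      match cs.findIdx? (· = '}') with
      | none => (-1 : Int)
      | some n => (n : Int) := by
  cases h : cs.findIdx? (· = '}') with
  | none =>
    rw [PySem.Chars.find_eq_neg_one_iff]
    intro hinf
    have hm : '}' ∈ cs := hinf.mem (by simp)
    have := List.findIdx?_eq_none_iff.mp h '}' hm
    simp at this
  | some n =>
    obtain ⟨hn, hidx⟩ := List.findIdx?_eq_some_iff_findIdx_eq.mp h
    obtain ⟨hget, hmin⟩ := (List.findIdx_eq hn).mp hidx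
    have hpre_n : ['}'] <+: cs.drop n := by
      rw [singleton_prefix_iff, List.head?_drop, List.getElem?_eq_getElem hn]
      simpa using hget
    have hinf : ['}'] <:+: cs :=
      List.infix_iff_prefix_suffix.mpr ⟨cs.drop n, hpre_n, List.drop_suffix _ _⟩
    have hnn : 0 ≤ PySem.Chars.find cs ['}'] := (PySem.Chars.find_nonneg_iff cs ['}']).mpr hinf
    obtain ⟨hpre, hspec⟩ := PySem.Chars.find_spec hnn
    have htn : (PySem.Chars.find cs ['}']).toNat = n := by
      by_contra hne
      rcases Nat.lt_or_ge (PySem.Chars.find cs ['}']).toNat n with hlt | hge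
      · rw [singleton_prefix_iff, List.head?_drop] at hpre
        have hlt' : (PySem.Chars.find cs ['}']).toNat < cs.length := by omega
        rw [List.getElem?_eq_getElem hlt'] at hpre
        have hne' := hmin _ hlt
        simp_all
      · exact hspec n (by omega) hpre_n
    show PySem.Chars.find cs ['}'] = (n : Int)
    omega

-- ===== VERDICT (by name: the statement is the Claim_ definition above) =====
theorem get_code_and_closing_brace_index_spec : Claim_equal_get_code_and_closing_brace_index := by
  intro s _
  unfold Spec_get_code_and_closing_brace_index get_code_and_closing_brace_index get_code_and_closing_brace_index_alt
  have hb : ("}" : String).toList = ['}'] := rfl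
  simp only [PySem.Str.find_eq, hb]
  rw [pvGoA_eq]
  have hf := find_brace_eq s.toList
  cases h : s.toList.findIdx? (· = '}') with
  | none =>
    rw [h] at hf
    have hf' : PySem.Chars.find s.toList ['}'] = -1 := hf
    simp [hf', String.ofList_toList]
  | some n =>
    rw [h] at hf
    have hf' : PySem.Chars.find s.toList ['}'] = (n : Int) := hf
    rw [hf', if_neg (by omega)]
    refine Prod.ext ?_ (by simp)
    apply String.toList_inj.mp
    rw [PySem.Str.toList_slice, PySem.Chars.slice_eq_listSlice,
        (by push_cast; ring : ((n : Int) + 1) = ((n + 1 : Nat) : Int)),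
        PySem.List.slice_to_natCast]
    simp
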